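-- pv_equiv track=rewrite | github.com/HuangLab-PKU/PRISM-Code | src/gene_calling/gmm_method.py | _ring_spiral_order_unified
-- ===== SOURCE A (Python) =====
-- def _ring_spiral_order_unified(color_grade: int):
--     """Generate ring-spiral triplet indices in unified order (ch1,ch2,ch4)."""
--     S = color_grade - 1
--     order = []
--     for r in range(0, S + 1):
--         S_prime = S - 3 * r
--         if S_prime < 0:
--             break
--         ring_points = []
--         if S_prime == 0:
--             ring_points.append((0, 0, 0))
--         else:
--             edge_AB = [(S_prime - t, t, 0) for t in range(0, S_prime + 1)]  # ch1->ch2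
--             edge_BC = [(0, S_prime - t, t) for t in range(0, S_prime + 1)]  # ch2->ch4
--             edge_CA = [(t, 0, S_prime - t) for t in range(0, S_prime + 1)]  # ch4->ch1
--             seq = edge_AB + edge_BC + edge_CA
--             seen = set()
--             for p in seq:
--                 if p not in seen:
--                     seen.add(p)
--                     ring_points.append(p)
--         ring_points_orig = [(a + r, b + r, c + r) for (a, b, c) in ring_points]
--         order.extend(ring_points_orig)
--     order = [t for t in order if sum(t) == (color_grade - 1) and all(0 <= v <= (color_grade - 1) for v in t)]
--     out, seen = [], set()
--     for t in order:
--         if t not in seen: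
--             seen.add(t)
--             out.append(t)
--     return out
-- ===== SOURCE B (Python) =====
-- def _ring_spiral_order_unified(color_grade: int):
--     """Enumerate all triplets summing to color_grade-1, then sort them by
--     (ring radius, position along the ring perimeter) instead of walking the
--     spiral ring by ring."""
--     S = color_grade - 1
--     triplets = [(a, b, S - a - b) for a in range(S + 1) for b in range(S - a + 1)]
--
--     def key(t):
--         a, b, c = t
--         r = min(a, b, c)
--         x, y, z = a - r, b - r, c - r
--         s = x + y + z
--         if z == 0 and x > 0:
--             pos = y
--         elif x == 0 and y > 0:
--             pos = s + z
--         elif y == 0 and z > 0: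
--             pos = 2 * s + x
--         else:
--             pos = 0
--         return (r, pos)
--
--     return sorted(triplets, key=key)
-- ===== Notes on version B (the rewrite author's own statement) =====
-- stated objective: alternative
-- what changed: Replaces the constructive ring-by-ring spiral walk with its seen-set dedup, no-op filter and final dedup by a flat enumeration of all triplets summing to color_grade-1 followed by one sort under a geometric key (ring radius, perimeter position).
import Mathlib
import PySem

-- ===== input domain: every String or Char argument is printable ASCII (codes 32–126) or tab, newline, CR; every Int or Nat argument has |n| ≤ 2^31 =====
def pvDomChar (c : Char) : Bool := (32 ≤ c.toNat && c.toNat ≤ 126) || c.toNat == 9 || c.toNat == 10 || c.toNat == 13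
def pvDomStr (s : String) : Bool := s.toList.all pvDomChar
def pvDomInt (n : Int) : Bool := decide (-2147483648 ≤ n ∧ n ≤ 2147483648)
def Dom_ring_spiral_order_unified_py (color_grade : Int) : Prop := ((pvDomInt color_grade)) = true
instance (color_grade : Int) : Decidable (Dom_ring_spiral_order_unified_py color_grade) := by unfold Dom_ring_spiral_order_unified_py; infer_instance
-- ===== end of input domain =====

-- B replaces A's constructive ring-by-ring spiral walk (with seen-set dedup and a
-- no-op filter/dedup pass) by enumerating all triplets summing to color_grade-1 and
-- sorting them once under a geometric key (ring radius, perimeter position): an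
-- alternative algorithm of similar cost.

-- ===== PORT A =====
-- the 'if p not in seen: seen.add(p); out.append(p)' loop body (used twice in A)
def pyDedupStep (st : PySem.Set (Int × Int × Int) × List (Int × Int × Int))
    (p : Int × Int × Int) : PySem.Set (Int × Int × Int) × List (Int × Int × Int) :=
  if PySem.Set.contains st.1 p then st else (PySem.Set.add st.1 p, st.2 ++ [p])

-- one loop iteration's ring_points (the body of A's 'for r' loop, before shifting)
def ringBodyA (s' : Int) : List (Int × Int × Int) :=
  if s' = 0 then [((0 : Int), (0 : Int), (0 : Int))]
  else
    let edge_AB := (PySem.List.pyRange 0 (s' + 1)).map (fun t => (s' - t, t, (0 : Int)))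
    let edge_BC := (PySem.List.pyRange 0 (s' + 1)).map (fun t => ((0 : Int), s' - t, t))
    let edge_CA := (PySem.List.pyRange 0 (s' + 1)).map (fun t => (t, (0 : Int), s' - t))
    ((edge_AB ++ edge_BC ++ edge_CA).foldl pyDedupStep (PySem.Set.empty, [])).2

-- A's 'for r in range(0, S+1)' loop with its break
def loopA (S : Int) : List Int → List (Int × Int × Int) → List (Int × Int × Int)
  | [], order => order
  | r :: rest, order =>
      if S - 3 * r < 0 then order
      else loopA S rest (order ++ (ringBodyA (S - 3 * r)).map (fun p => (p.1 + r, p.2.1 + r, p.2.2 + r)))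

def ring_spiral_order_unified_py (color_grade : Int) : List (Int × Int × Int) :=
  let S := color_grade - 1
  let order := loopA S (PySem.List.pyRange 0 (S + 1)) []
  let order2 := order.filter (fun t =>
    decide (t.1 + t.2.1 + t.2.2 = color_grade - 1) &&
    (decide (0 ≤ t.1 ∧ t.1 ≤ color_grade - 1) &&
     decide (0 ≤ t.2.1 ∧ t.2.1 ≤ color_grade - 1) &&
     decide (0 ≤ t.2.2 ∧ t.2.2 ≤ color_grade - 1)))
  (order2.foldl pyDedupStep (PySem.Set.empty, [])).2

-- ===== PORT B =====
-- key(t) = (ring radius, position along the ring perimeter); B sorts by it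
def minT (t : Int × Int × Int) : Int := min t.1 (min t.2.1 t.2.2)

def posT (t : Int × Int × Int) : Int :=
  let r := minT t
  let x := t.1 - r
  let y := t.2.1 - r
  let z := t.2.2 - r
  let s := x + y + z
  if z = 0 ∧ 0 < x then y
  else if x = 0 ∧ 0 < y then s + z
  else if y = 0 ∧ 0 < z then 2 * s + x
  else 0

def ring_spiral_order_unified_py_alt (color_grade : Int) : List (Int × Int × Int) :=
  let S := color_grade - 1
  let triplets := (PySem.List.pyRange 0 (S + 1)).flatMap
    (fun a => (PySem.List.pyRange 0 (S - a + 1)).map (fun b => (a, b, S - a - b)))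
  PySem.List.sorted2 triplets minT posT

-- ===== PRECONDITION & SPEC =====
def Spec_ring_spiral_order_unified_py (color_grade : Int) (out : List (Int × Int × Int)) : Prop := out = ring_spiral_order_unified_py_alt color_grade
instance (color_grade : Int) (out : List (Int × Int × Int)) : Decidable (Spec_ring_spiral_order_unified_py color_grade out) := by unfold Spec_ring_spiral_order_unified_py; infer_instance

-- ===== CLAIM (what is proved, stated in full; the proofs are below) =====
def Claim_equal_ring_spiral_order_unified_py : Prop := ∀ (color_grade : Int), Dom_ring_spiral_order_unified_py color_grade → Spec_ring_spiral_order_unified_py color_grade (ring_spiral_order_unified_py color_grade)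

-- ===== LEMMAS AND PROOFS =====

-- the canonical spiral list both ports are shown to equal
def ringPts (s : Int) : List (Int × Int × Int) :=
  if s = 0 then [((0 : Int), (0 : Int), (0 : Int))]
  else ((PySem.List.pyRange 0 (s + 1)).map (fun t => (s - t, t, (0 : Int))))
    ++ ((PySem.List.pyRange 1 (s + 1)).map (fun t => ((0 : Int), s - t, t)))
    ++ ((PySem.List.pyRange 1 s).map (fun t => (t, (0 : Int), s - t)))

def shiftT (r : Int) (p : Int × Int × Int) : Int × Int × Int := (p.1 + r, p.2.1 + r, p.2.2 + r)

def canonical (S : Int) : List (Int × Int × Int) :=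
  (PySem.List.pyRange 0 (PySem.Int.floordiv S 3 + 1)).flatMap
    (fun r => (ringPts (S - 3 * r)).map (shiftT r))

def keyL (p : Int × Int × Int) : Lex (Int × Int) := toLex (minT p, posT p)

theorem dedup_foldl (xs : List (Int × Int × Int)) (s : PySem.Set (Int × Int × Int)) :
    xs.foldl pyDedupStep (s, s) = (PySem.Set.update s xs, PySem.Set.update s xs) := by
  induction xs generalizing s with
  | nil => simp [PySem.Set.update_nil]
  | cons x xs ih =>
    rw [List.foldl_cons, PySem.Set.update_cons]
    by_cases h : x ∈ s
    · have hstep : pyDedupStep (s, s) x = (s, s) := by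
        simp [pyDedupStep, PySem.Set.contains_iff, h]
      have hadd : PySem.Set.add s x = s := by
        simp [PySem.Set.add, PySem.Set.contains_iff, h]
      rw [hstep, hadd, ih]
    · have hadd : PySem.Set.add s x = s ++ [x] := by
        simp [PySem.Set.add, PySem.Set.contains_iff, h]
      have hstep : pyDedupStep (s, s) x = (PySem.Set.add s x, PySem.Set.add s x) := by
        simp [pyDedupStep, PySem.Set.contains_iff, h, hadd]
      rw [hstep, ih]

theorem dedup_snd (xs : List (Int × Int × Int)) :
    (xs.foldl pyDedupStep (PySem.Set.empty, [])).2 = PySem.Set.ofList xs := by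
  show (xs.foldl pyDedupStep (PySem.Set.empty, PySem.Set.empty)).2 = PySem.Set.ofList xs
  rw [dedup_foldl, PySem.Set.update_empty]

theorem ringBodyA_eq (s : Int) (hs : 0 ≤ s) : ringBodyA s = ringPts s := by
  by_cases h0 : s = 0
  · subst h0; rfl
  · have hs' : 0 < s := by omega
    simp only [ringBodyA, ringPts, if_neg h0]
    rw [dedup_snd]
    set AB := (PySem.List.pyRange 0 (s + 1)).map (fun t => (s - t, t, (0 : Int))) with hAB
    set BC := (PySem.List.pyRange 0 (s + 1)).map (fun t => ((0 : Int), s - t, t)) with hBC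
    set CA := (PySem.List.pyRange 0 (s + 1)).map (fun t => (t, (0 : Int), s - t)) with hCA
    set BC' := (PySem.List.pyRange 1 (s + 1)).map (fun t => ((0 : Int), s - t, t)) with hBC'
    set CAm := (PySem.List.pyRange 1 s).map (fun t => (t, (0 : Int), s - t)) with hCAm
    have hb0 : ((0 : Int), s, (0 : Int)) ∈ AB := by
      rw [hAB]
      refine List.mem_map.mpr ⟨s, ?_, by simp⟩
      rw [PySem.List.mem_pyRange_one]; omega
    have hsl : ((s : Int), (0 : Int), (0 : Int)) ∈ AB := by
      rw [hAB]
      refine List.mem_map.mpr ⟨0, ?_, by simp⟩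
      rw [PySem.List.mem_pyRange_one]; omega
    have hc0 : ((0 : Int), (0 : Int), s) ∈ BC' := by
      rw [hBC']
      refine List.mem_map.mpr ⟨s, ?_, by simp⟩
      rw [PySem.List.mem_pyRange_one]; omega
    have hABz : ∀ p ∈ AB, p.2.2 = 0 := by
      rw [hAB]
      rintro p hp
      obtain ⟨t, -, rfl⟩ := List.mem_map.mp hp
      rfl
    have hBC'x : ∀ p ∈ BC', p.1 = 0 ∧ 1 ≤ p.2.2 := by
      rw [hBC']
      rintro p hp
      obtain ⟨t, ht, rfl⟩ := List.mem_map.mp hp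
      rw [PySem.List.mem_pyRange_one] at ht
      exact ⟨rfl, by show 1 ≤ t; omega⟩
    have hABnd : AB.Nodup := by
      rw [hAB]
      exact (PySem.List.nodup_pyRange_one 0 (s + 1)).map
        (fun t1 t2 h => congrArg (fun q : Int × Int × Int => q.2.1) h)
    have hBCnd : BC.Nodup := by
      rw [hBC]
      exact (PySem.List.nodup_pyRange_one 0 (s + 1)).map
        (fun t1 t2 h => congrArg (fun q : Int × Int × Int => q.2.2) h)
    have hCAnd : CA.Nodup := by
      rw [hCA]
      exact (PySem.List.nodup_pyRange_one 0 (s + 1)).map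
        (fun t1 t2 h => congrArg (fun q : Int × Int × Int => q.1) h)
    have hu1 : PySem.Set.update AB BC = AB ++ BC' := by
      rw [PySem.Set.update_eq_append_filter, PySem.Set.ofList_eq_self_of_nodup _ hBCnd]
      congr 1
      rw [hBC, PySem.List.pyRange_one_cons (by omega : (0 : Int) < s + 1)]
      simp only [zero_add]
      rw [List.map_cons]
      rw [show ((0 : Int), s - 0, (0 : Int)) = ((0 : Int), s, (0 : Int)) by norm_num]
      rw [List.filter_cons, if_neg (by simp [PySem.Set.contains_iff, hb0])]
      rw [List.filter_eq_self.mpr ?_, hBC']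
      intro y hy
      obtain ⟨t, ht, rfl⟩ := List.mem_map.mp hy
      rw [PySem.List.mem_pyRange_one] at ht
      have hnm : ((0 : Int), s - t, t) ∉ AB := by
        intro hmem
        have h2 : t = 0 := hABz _ hmem
        omega
      simp [PySem.Set.contains_iff, hnm]
    have hu2 : PySem.Set.update (AB ++ BC') CA = (AB ++ BC') ++ CAm := by
      rw [PySem.Set.update_eq_append_filter, PySem.Set.ofList_eq_self_of_nodup _ hCAnd]
      congr 1
      rw [hCA, PySem.List.pyRange_one_cons (by omega : (0 : Int) < s + 1)]
      simp only [zero_add]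
      rw [PySem.List.pyRange_one_succ_right (by omega : (1 : Int) ≤ s), List.map_cons,
          List.map_append]
      rw [show ((0 : Int), (0 : Int), s - 0) = ((0 : Int), (0 : Int), s) by norm_num]
      rw [List.filter_cons,
          if_neg (by simp [PySem.Set.contains_iff, List.mem_append, hc0])]
      rw [List.filter_append]
      rw [List.filter_eq_self.mpr ?_]
      · rw [show List.map (fun t => (t, (0 : Int), s - t)) [s] = [((s : Int), (0 : Int), s - s)]
            from rfl]
        rw [show ((s : Int), (0 : Int), s - s) = ((s : Int), (0 : Int), (0 : Int)) by norm_num]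
        rw [List.filter_cons,
            if_neg (by simp [PySem.Set.contains_iff, List.mem_append, hsl])]
        rw [List.filter_nil, List.append_nil, hCAm]
      · intro y hy
        obtain ⟨t, ht, rfl⟩ := List.mem_map.mp hy
        rw [PySem.List.mem_pyRange_one] at ht
        have hnm : ((t : Int), (0 : Int), s - t) ∉ AB ++ BC' := by
          intro hmem
          rcases List.mem_append.mp hmem with hm | hm
          · have h2 : s - t = 0 := hABz _ hm
            omega
          · have h2 : t = 0 := (hBC'x _ hm).1
            omega
        simp [PySem.Set.contains_iff, hnm]
    rw [PySem.Set.ofList_append, PySem.Set.ofList_append,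
        PySem.Set.ofList_eq_self_of_nodup _ hABnd, hu1, hu2]

theorem mem_ringPts (s : Int) (hs : 0 ≤ s) (q : Int × Int × Int) :
    q ∈ ringPts s ↔ 0 ≤ q.1 ∧ 0 ≤ q.2.1 ∧ 0 ≤ q.2.2 ∧ q.1 + q.2.1 + q.2.2 = s ∧
      (q.1 = 0 ∨ q.2.1 = 0 ∨ q.2.2 = 0) := by
  obtain ⟨a, b, c⟩ := q
  by_cases h0 : s = 0
  · subst h0
    constructor
    · intro h; simp [ringPts] at h; dsimp only; omega
    · intro h; dsimp only at h; simp [ringPts]; omega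
  · simp only [ringPts, if_neg h0, List.mem_append, List.mem_map, PySem.List.mem_pyRange_one,
      Prod.mk.injEq]
    constructor
    · rintro ((⟨t, ht, rfl, rfl, rfl⟩ | ⟨t, ht, rfl, rfl, rfl⟩) | ⟨t, ht, rfl, rfl, rfl⟩) <;>
        simp <;> omega
    · rintro ⟨ha, hb, hc, hsum, hz⟩
      by_cases hc0 : c = 0
      · exact Or.inl (Or.inl ⟨b, by omega, by omega, rfl, by omega⟩)
      · by_cases ha0 : a = 0
        · exact Or.inl (Or.inr ⟨c, by omega, by omega, by omega, rfl⟩)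
        · exact Or.inr ⟨a, by omega, rfl, by omega, by omega⟩

theorem keyL_lt_iff (p q : Int × Int × Int) :
    keyL p < keyL q ↔ minT p < minT q ∨ (minT p = minT q ∧ posT p < posT q) := by
  simp [keyL, Prod.Lex.lt_iff]

theorem key_AB (s r t : Int) (hs : 0 < s) (h0 : 0 ≤ t) (h1 : t ≤ s) :
    minT (shiftT r (s - t, t, 0)) = r ∧ posT (shiftT r (s - t, t, 0)) = t := by
  simp only [minT, posT, shiftT]
  constructor
  · omega
  · split_ifs <;> omega

theorem key_BC (s r t : Int) (hs : 0 < s) (h0 : 1 ≤ t) (h1 : t ≤ s) :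
    minT (shiftT r (0, s - t, t)) = r ∧ posT (shiftT r (0, s - t, t)) = s + t := by
  simp only [minT, posT, shiftT]
  constructor
  · omega
  · split_ifs <;> omega

theorem key_CA (s r t : Int) (hs : 0 < s) (h0 : 1 ≤ t) (h1 : t < s) :
    minT (shiftT r (t, 0, s - t)) = r ∧ posT (shiftT r (t, 0, s - t)) = 2 * s + t := by
  simp only [minT, posT, shiftT]
  constructor
  · omega
  · split_ifs <;> omega

theorem minT_shift_ring (s r : Int) (hs : 0 ≤ s) (q : Int × Int × Int) (hq : q ∈ ringPts s) :
    minT (shiftT r q) = r := by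
  rw [mem_ringPts s hs] at hq
  obtain ⟨a, b, c⟩ := q
  obtain ⟨ha, hb, hc, hsum, hz⟩ := hq
  dsimp only at ha hb hc hsum hz
  simp only [minT, shiftT]
  omega

theorem mem_ringPts' (s a b c : Int) (hs : 0 ≤ s) :
    ((a, b, c) ∈ ringPts s) ↔ 0 ≤ a ∧ 0 ≤ b ∧ 0 ≤ c ∧ a + b + c = s ∧
      (a = 0 ∨ b = 0 ∨ c = 0) :=
  mem_ringPts s hs (a, b, c)

theorem mem_canonical (S : Int) (p : Int × Int × Int) :
    p ∈ canonical S ↔ 0 ≤ p.1 ∧ 0 ≤ p.2.1 ∧ 0 ≤ p.2.2 ∧ p.1 + p.2.1 + p.2.2 = S := by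
  unfold canonical
  simp only [List.mem_flatMap, List.mem_map, PySem.List.mem_pyRange_one]
  constructor
  · rintro ⟨r, ⟨hr0, hr1⟩, q, hq, rfl⟩
    have h3 : r * 3 ≤ S := (PySem.Int.le_floordiv_iff_mul_le (by norm_num)).mp (by omega)
    obtain ⟨a, b, c⟩ := q
    rw [mem_ringPts' _ _ _ _ (by omega)] at hq
    obtain ⟨ha, hb, hc, hsum, hz⟩ := hq
    simp only [shiftT]
    omega
  · intro h
    obtain ⟨a, b, c⟩ := p
    have ha : 0 ≤ a := h.1
    have hb : 0 ≤ b := h.2.1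
    have hc : 0 ≤ c := h.2.2.1
    have hsum : a + b + c = S := h.2.2.2
    have hfd : min a (min b c) ≤ PySem.Int.floordiv S 3 :=
      (PySem.Int.le_floordiv_iff_mul_le (by norm_num)).mpr (by omega)
    refine ⟨min a (min b c), ⟨by omega, by omega⟩,
      (a - min a (min b c), b - min a (min b c), c - min a (min b c)), ?_, ?_⟩
    · rw [mem_ringPts' _ _ _ _ (by omega)]
      omega
    · simp only [shiftT, Prod.mk.injEq]
      omega

theorem pairwise_ring (s r : Int) (hs : 0 ≤ s) :
    ((ringPts s).map (shiftT r)).Pairwise (fun p q => keyL p < keyL q) := by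
  by_cases h0 : s = 0
  · subst h0; simp [ringPts]
  · have hs' : 0 < s := by omega
    have hkey : ∀ p q : Int × Int × Int, minT p = r → minT q = r → posT p < posT q →
        keyL p < keyL q := by
      intro p q hp hq hpos
      rw [keyL_lt_iff]
      exact Or.inr ⟨by rw [hp, hq], hpos⟩
    simp only [ringPts, if_neg h0, List.map_append, List.map_map]
    refine List.pairwise_append.mpr ⟨List.pairwise_append.mpr ⟨?_, ?_, ?_⟩, ?_, ?_⟩
    · rw [List.pairwise_map]
      refine (PySem.List.pairwise_lt_pyRange_one 0 (s + 1)).imp_of_mem ?_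
      intro t u ht hu hlt
      rw [PySem.List.mem_pyRange_one] at ht hu
      exact hkey _ _ (key_AB s r t hs' (by omega) (by omega)).1
        (key_AB s r u hs' (by omega) (by omega)).1
        (by simp only [Function.comp_apply]; rw [(key_AB s r t hs' (by omega) (by omega)).2,
                (key_AB s r u hs' (by omega) (by omega)).2]; omega)
    · rw [List.pairwise_map]
      refine (PySem.List.pairwise_lt_pyRange_one 1 (s + 1)).imp_of_mem ?_
      intro t u ht hu hlt
      rw [PySem.List.mem_pyRange_one] at ht hu
      exact hkey _ _ (key_BC s r t hs' (by omega) (by omega)).1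
        (key_BC s r u hs' (by omega) (by omega)).1
        (by simp only [Function.comp_apply]; rw [(key_BC s r t hs' (by omega) (by omega)).2,
                (key_BC s r u hs' (by omega) (by omega)).2]; omega)
    · intro x hx y hy
      obtain ⟨t, ht, rfl⟩ := List.mem_map.mp hx
      obtain ⟨u, hu, rfl⟩ := List.mem_map.mp hy
      rw [PySem.List.mem_pyRange_one] at ht hu
      exact hkey _ _ (key_AB s r t hs' (by omega) (by omega)).1
        (key_BC s r u hs' (by omega) (by omega)).1
        (by simp only [Function.comp_apply]; rw [(key_AB s r t hs' (by omega) (by omega)).2,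
                (key_BC s r u hs' (by omega) (by omega)).2]; omega)
    · rw [List.pairwise_map]
      refine (PySem.List.pairwise_lt_pyRange_one 1 s).imp_of_mem ?_
      intro t u ht hu hlt
      rw [PySem.List.mem_pyRange_one] at ht hu
      exact hkey _ _ (key_CA s r t hs' (by omega) (by omega)).1
        (key_CA s r u hs' (by omega) (by omega)).1
        (by simp only [Function.comp_apply]; rw [(key_CA s r t hs' (by omega) (by omega)).2,
                (key_CA s r u hs' (by omega) (by omega)).2]; omega)
    · intro x hx y hy
      obtain ⟨u, hu, rfl⟩ := List.mem_map.mp hy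
      rw [PySem.List.mem_pyRange_one] at hu
      rcases List.mem_append.mp hx with hx' | hx'
      · obtain ⟨t, ht, rfl⟩ := List.mem_map.mp hx'
        rw [PySem.List.mem_pyRange_one] at ht
        exact hkey _ _ (key_AB s r t hs' (by omega) (by omega)).1
          (key_CA s r u hs' (by omega) (by omega)).1
          (by simp only [Function.comp_apply]; rw [(key_AB s r t hs' (by omega) (by omega)).2,
                  (key_CA s r u hs' (by omega) (by omega)).2]; omega)
      · obtain ⟨t, ht, rfl⟩ := List.mem_map.mp hx'
        rw [PySem.List.mem_pyRange_one] at ht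
        exact hkey _ _ (key_BC s r t hs' (by omega) (by omega)).1
          (key_CA s r u hs' (by omega) (by omega)).1
          (by simp only [Function.comp_apply]; rw [(key_BC s r t hs' (by omega) (by omega)).2,
                  (key_CA s r u hs' (by omega) (by omega)).2]; omega)

theorem pairwise_canonical (S : Int) :
    (canonical S).Pairwise (fun p q => keyL p < keyL q) := by
  unfold canonical
  rw [List.pairwise_flatMap]
  constructor
  · intro r hr
    rw [PySem.List.mem_pyRange_one] at hr
    have h3 : r * 3 ≤ S := (PySem.Int.le_floordiv_iff_mul_le (by norm_num)).mp (by omega)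
    exact pairwise_ring _ r (by omega)
  · refine (PySem.List.pairwise_lt_pyRange_one _ _).imp_of_mem ?_
    intro r1 r2 h1 h2 hlt x hx y hy
    rw [PySem.List.mem_pyRange_one] at h1 h2
    have h31 : r1 * 3 ≤ S := (PySem.Int.le_floordiv_iff_mul_le (by norm_num)).mp (by omega)
    have h32 : r2 * 3 ≤ S := (PySem.Int.le_floordiv_iff_mul_le (by norm_num)).mp (by omega)
    obtain ⟨q1, hq1, rfl⟩ := List.mem_map.mp hx
    obtain ⟨q2, hq2, rfl⟩ := List.mem_map.mp hy
    rw [keyL_lt_iff]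
    exact Or.inl (by
      rw [minT_shift_ring _ r1 (by omega) _ hq1, minT_shift_ring _ r2 (by omega) _ hq2]
      exact hlt)

theorem nodup_canonical (S : Int) : (canonical S).Nodup := by
  refine (pairwise_canonical S).imp ?_
  intro p q h heq
  subst heq
  exact absurd h (lt_irrefl _)

theorem loopA_all (S : Int) (xs : List Int) (h : ∀ r ∈ xs, 0 ≤ S - 3 * r) :
    ∀ (rest : List Int) (order : List (Int × Int × Int)),
      loopA S (xs ++ rest) order =
        loopA S rest (order ++ xs.flatMap
          (fun r => (ringBodyA (S - 3 * r)).map (fun p => (p.1 + r, p.2.1 + r, p.2.2 + r)))) := by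
  induction xs with
  | nil => intro rest order; simp
  | cons x xs ih =>
    intro rest order
    have hx : 0 ≤ S - 3 * x := h x (by simp)
    simp only [List.cons_append, loopA]
    rw [if_neg (by omega)]
    rw [ih (fun r hr => h r (List.mem_cons_of_mem _ hr)) rest]
    simp [List.flatMap_cons, List.append_assoc]

theorem A_eq_canonical (cg : Int) : ring_spiral_order_unified_py cg = canonical (cg - 1) := by
  simp only [ring_spiral_order_unified_py]
  by_cases hneg : cg - 1 < 0
  · rw [PySem.List.pyRange_one_eq_nil (by omega)]
    have hcan : canonical (cg - 1) = [] := by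
      unfold canonical
      rw [PySem.List.pyRange_one_eq_nil ?_]
      · rfl
      · by_contra hx
        push_neg at hx
        have h2 := (PySem.Int.le_floordiv_iff_mul_le (by norm_num : (0 : Int) < 3)).mp
          (by omega : (0 : Int) ≤ PySem.Int.floordiv (cg - 1) 3)
        omega
    rw [hcan]
    simp [loopA, dedup_snd]
  · push_neg at hneg
    set S := cg - 1 with hS
    have hfd0 : 0 ≤ PySem.Int.floordiv S 3 :=
      (PySem.Int.le_floordiv_iff_mul_le (by norm_num)).mpr (by omega)
    have hfd3 : PySem.Int.floordiv S 3 * 3 ≤ S :=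
      (PySem.Int.le_floordiv_iff_mul_le (by norm_num)).mp le_rfl
    have hfd4 : S < (PySem.Int.floordiv S 3 + 1) * 3 :=
      (PySem.Int.floordiv_lt_iff_lt_mul (by norm_num)).mp (by omega)
    rw [PySem.List.pyRange_one_append 0 (PySem.Int.floordiv S 3 + 1) (S + 1) (by omega) (by omega)]
    rw [loopA_all S _ (fun r hr => by
      rw [PySem.List.mem_pyRange_one] at hr
      have h3 : r * 3 ≤ S := (PySem.Int.le_floordiv_iff_mul_le (by norm_num)).mp (by omega)
      omega)]
    have hrest : ∀ order, loopA S (PySem.List.pyRange (PySem.Int.floordiv S 3 + 1) (S + 1)) order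
        = order := by
      intro order
      by_cases hlt : PySem.Int.floordiv S 3 + 1 < S + 1
      · rw [PySem.List.pyRange_one_cons hlt]
        simp only [loopA]
        rw [if_pos (by omega)]
      · rw [PySem.List.pyRange_one_eq_nil (by omega)]
        rfl
    rw [hrest, List.nil_append]
    have hflat : (PySem.List.pyRange 0 (PySem.Int.floordiv S 3 + 1)).flatMap
        (fun r => (ringBodyA (S - 3 * r)).map (fun p => (p.1 + r, p.2.1 + r, p.2.2 + r)))
        = canonical S := by
      unfold canonical
      refine List.flatMap_congr ?_
      intro r hr
      rw [PySem.List.mem_pyRange_one] at hr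
      have h3 : r * 3 ≤ S := (PySem.Int.le_floordiv_iff_mul_le (by norm_num)).mp (by omega)
      rw [ringBodyA_eq _ (by omega)]
      rfl
    rw [hflat]
    rw [List.filter_eq_self.mpr ?_]
    · rw [dedup_snd, PySem.Set.ofList_eq_self_of_nodup _ (nodup_canonical S)]
    · intro p hp
      rw [mem_canonical] at hp
      obtain ⟨a, b, c⟩ := p
      have h1 : 0 ≤ a := hp.1
      have h2 : 0 ≤ b := hp.2.1
      have h3 : 0 ≤ c := hp.2.2.1
      have h4 : a + b + c = S := hp.2.2.2
      simp only [Bool.and_eq_true, decide_eq_true_eq]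
      omega

theorem sorted2_eq_sorted_toLex {α : Type} (xs : List α) (k1 k2 : α → Int) :
    PySem.List.sorted2 xs k1 k2 = PySem.List.sorted xs (fun a => toLex (k1 a, k2 a)) := by
  rw [PySem.List.sorted_eq_foldl_insertBy]
  simp only [PySem.List.sorted2]
  have hb : (fun a b => decide (k1 a < k1 b) || (!decide (k1 b < k1 a) && decide (k2 a < k2 b)))
      = (fun a b => decide (toLex (k1 a, k2 a) < toLex (k1 b, k2 b))) := by
    funext a b
    by_cases h1 : k1 a < k1 b <;> by_cases h2 : k1 b < k1 a <;> by_cases h3 : k2 a < k2 b <;>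
      simp [h1, h2, h3, Prod.Lex.lt_iff] <;> omega
  rw [hb]
  simp

theorem mem_enumT (S : Int) (p : Int × Int × Int) :
    (p ∈ (PySem.List.pyRange 0 (S + 1)).flatMap
        (fun a => (PySem.List.pyRange 0 (S - a + 1)).map (fun b => (a, b, S - a - b)))) ↔
      0 ≤ p.1 ∧ 0 ≤ p.2.1 ∧ 0 ≤ p.2.2 ∧ p.1 + p.2.1 + p.2.2 = S := by
  obtain ⟨a, b, c⟩ := p
  simp only [List.mem_flatMap, List.mem_map, PySem.List.mem_pyRange_one, Prod.mk.injEq]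
  constructor
  · rintro ⟨x, hx, y, hy, rfl, rfl, rfl⟩; omega
  · rintro ⟨ha, hb, hc, hsum⟩
    exact ⟨a, by omega, b, by omega, rfl, rfl, by omega⟩

theorem nodup_enumT (S : Int) :
    ((PySem.List.pyRange 0 (S + 1)).flatMap
      (fun a => (PySem.List.pyRange 0 (S - a + 1)).map (fun b => (a, b, S - a - b)))).Nodup := by
  have hp : ((PySem.List.pyRange 0 (S + 1)).flatMap
      (fun a => (PySem.List.pyRange 0 (S - a + 1)).map (fun b => (a, b, S - a - b)))).Pairwise
        (fun p q => toLex (p.1, p.2.1) < toLex (q.1, q.2.1)) := by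
    rw [List.pairwise_flatMap]
    constructor
    · intro a _
      rw [List.pairwise_map]
      refine (PySem.List.pairwise_lt_pyRange_one 0 (S - a + 1)).imp ?_
      intro b1 b2 hlt
      rw [Prod.Lex.lt_iff]
      exact Or.inr ⟨rfl, hlt⟩
    · refine (PySem.List.pairwise_lt_pyRange_one 0 (S + 1)).imp_of_mem ?_
      intro a1 a2 _ _ hlt x hx y hy
      obtain ⟨b1, _, rfl⟩ := List.mem_map.mp hx
      obtain ⟨b2, _, rfl⟩ := List.mem_map.mp hy
      rw [Prod.Lex.lt_iff]
      exact Or.inl hlt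
  refine hp.imp ?_
  intro p q h heq
  subst heq
  exact absurd h (lt_irrefl _)

theorem B_eq_canonical (cg : Int) : ring_spiral_order_unified_py_alt cg = canonical (cg - 1) := by
  simp only [ring_spiral_order_unified_py_alt]
  rw [sorted2_eq_sorted_toLex]
  exact PySem.List.sorted_eq_of_perm_of_pairwise_lt _ _ (fun a => toLex (minT a, posT a))
    ((List.perm_ext_iff_of_nodup (nodup_canonical _) (nodup_enumT _)).mpr
      (fun p => by rw [mem_canonical, mem_enumT]))
    (pairwise_canonical _)

-- ===== VERDICT (by name: the statement is the Claim_ definition above) =====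
theorem ring_spiral_order_unified_py_spec : Claim_equal_ring_spiral_order_unified_py := by
  intro cg _
  unfold Spec_ring_spiral_order_unified_py
  rw [A_eq_canonical, B_eq_canonical]
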